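-- pv_equiv track=rewrite | github.com/marcio55afr/SearchTechnique | ngram_resolution.py | _generate_window_lengths
-- ===== SOURCE A (Python) =====
-- def _generate_window_lengths(min_length ,max_length):
--
--     # If the minimum window is longer than the series raise an error
--     if(min_length > max_length):
--         raise 'The series has length of {} and \
--         it is shorter than minimum window of {} length'.format(min_length,
--         max_length)
--
--     aux = min_length
--     window_lengths = [aux]
--     aux *= 2
--
--     while(aux <=  max_length):
--         window_lengths.append(aux)
--         aux *= 2
--
--     return window_lengths
-- ===== SOURCE B (Python) =====
-- def _generate_window_lengths(min_length, max_length):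
--
--     # If the minimum window is longer than the series raise an error
--     if(min_length > max_length):
--         raise 'The series has length of {} and \
--         it is shorter than minimum window of {} length'.format(min_length,
--         max_length)
--
--     # Closed-form count: min_length * 2**i <= max_length  iff  i < (max_length // min_length).bit_length(),
--     # so first compute the number of terms, then build the whole list in one comprehension.
--     n_terms = (max_length // min_length).bit_length()
--     return [min_length * 2**i for i in range(n_terms)]
-- ===== Notes on version B (the rewrite author's own statement) =====
-- stated objective: alternative
-- what changed: Replaced A's accumulator doubling loop by a two-stage closed-form build: first compute the number of terms as (max_length // min_length).bit_length(), then produce the list in one comprehension as min_length * 2**i over range(n_terms).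
import Mathlib
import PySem

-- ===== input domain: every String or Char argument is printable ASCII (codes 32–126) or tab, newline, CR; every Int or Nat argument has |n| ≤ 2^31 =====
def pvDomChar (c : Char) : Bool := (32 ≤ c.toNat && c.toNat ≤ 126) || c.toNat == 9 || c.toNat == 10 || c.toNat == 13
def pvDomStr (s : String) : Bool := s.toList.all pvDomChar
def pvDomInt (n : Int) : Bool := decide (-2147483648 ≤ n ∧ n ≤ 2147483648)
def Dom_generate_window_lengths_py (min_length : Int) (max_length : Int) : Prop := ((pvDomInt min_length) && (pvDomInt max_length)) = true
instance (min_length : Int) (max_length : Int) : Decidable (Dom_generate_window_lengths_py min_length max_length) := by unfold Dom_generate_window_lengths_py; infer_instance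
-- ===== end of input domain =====

-- B replaces A's accumulator doubling loop by a closed-form term count
-- ((max // min).bit_length()) followed by one comprehension; alternative decomposition, same cost.

-- ===== PORT A =====
-- A's while loop: while aux <= max: append aux; aux *= 2.  Fuel (mx+1-aux).toNat is
-- enough iterations whenever aux ≥ 1, i.e. on all of Pre_.
def pvLoopA : Nat → Int → Int → List Int
  | 0, _, _ => []
  | n+1, aux, mx => if aux ≤ mx then aux :: pvLoopA n (aux * 2) mx else []

def generate_window_lengths_py (min_length : Int) (max_length : Int) : List Int :=
  -- window_lengths = [aux]; aux *= 2; while loop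
  min_length :: pvLoopA (max_length + 1 - min_length * 2).toNat (min_length * 2) max_length

-- ===== PORT B =====
-- n_terms = (max_length // min_length).bit_length(); [min_length * 2**i for i in range(n_terms)]
def generate_window_lengths_py_alt (min_length : Int) (max_length : Int) : List Int :=
  (List.range (PySem.Int.bitLength (PySem.Int.floordiv max_length min_length))).map
    (fun i => min_length * 2 ^ i)

-- ===== PRECONDITION & SPEC =====
-- Pre_ excludes min_length > max_length, where A raises (TypeError: exceptions must derive
-- from BaseException), and min_length ≤ 0, where A's doubling loop never terminates.
def Pre_generate_window_lengths_py (min_length : Int) (max_length : Int) : Prop :=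
  1 ≤ min_length ∧ min_length ≤ max_length
instance (min_length : Int) (max_length : Int) : Decidable (Pre_generate_window_lengths_py min_length max_length) := by unfold Pre_generate_window_lengths_py; infer_instance

def pvWitness_generate_window_lengths_py : Int × Int := (3, 50)

def Spec_generate_window_lengths_py (min_length : Int) (max_length : Int) (out : List Int) : Prop := out = generate_window_lengths_py_alt min_length max_length
instance (min_length : Int) (max_length : Int) (out : List Int) : Decidable (Spec_generate_window_lengths_py min_length max_length out) := by unfold Spec_generate_window_lengths_py; infer_instance

-- ===== CLAIM (what is proved, stated in full; the proofs are below) =====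
def Claim_equal_generate_window_lengths_py : Prop := ∀ (min_length : Int) (max_length : Int), Dom_generate_window_lengths_py min_length max_length → Pre_generate_window_lengths_py min_length max_length → Spec_generate_window_lengths_py min_length max_length (generate_window_lengths_py min_length max_length)

-- ===== LEMMAS AND PROOFS =====

-- Python's n.bit_length() (for n ≥ 0) counts halvings: j < bit_length(n) ↔ 2^j ≤ n.
theorem pvBitAux_iff : ∀ (f n j : Nat), n < f →
    (j < PySem.Int.bitLengthAux f n ↔ 2 ^ j ≤ n) := by
  intro f
  induction f with
  | zero => intro n j h; omega
  | succ m ih =>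
    intro n j h
    by_cases hn : n = 0
    · subst hn
      simp [PySem.Int.bitLengthAux]
    · simp only [PySem.Int.bitLengthAux, if_neg hn]
      cases j with
      | zero =>
        constructor
        · intro _; simpa using Nat.one_le_iff_ne_zero.mpr hn
        · intro _; omega
      | succ k =>
        have hlt : n / 2 < m := by omega
        rw [Nat.add_lt_add_iff_right, ih (n / 2) k hlt, pow_succ]
        constructor
        · intro hk; omega
        · intro hk; omega

-- The number of terms: j < bitLength (mx // mn) ↔ mn * 2^j ≤ mx, for 1 ≤ mn ≤ mx.
theorem pvCount_iff (mn mx : Int) (hmn : 1 ≤ mn) (hmx : mn ≤ mx) (j : Nat) :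
    mn * 2 ^ j ≤ mx ↔ j < PySem.Int.bitLength (PySem.Int.floordiv mx mn) := by
  have hb : (0:Int) < mn := by omega
  have hq1 : (1:Int) ≤ PySem.Int.floordiv mx mn := by
    rw [PySem.Int.le_floordiv_iff_mul_le hb]; omega
  have hq : (((PySem.Int.floordiv mx mn).natAbs : Int)) = PySem.Int.floordiv mx mn :=
    Int.natAbs_of_nonneg (by omega)
  have hcast : (((2:Nat) ^ j : Nat) : Int) = (2:Int) ^ j := by push_cast; ring
  have h1 : mn * 2 ^ j ≤ mx ↔ (2:Int) ^ j ≤ PySem.Int.floordiv mx mn := by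
    rw [PySem.Int.le_floordiv_iff_mul_le hb, mul_comm]
  rw [h1, ← hq, ← hcast, Nat.cast_le]
  unfold PySem.Int.bitLength
  rw [pvBitAux_iff _ _ _ (by omega)]
  simp [Int.natAbs_abs]

-- A's loop started at mn*2^i produces exactly the remaining closed-form terms.
theorem pvLoopA_map (mn mx : Int) (K : Nat)
    (hK : ∀ j : Nat, mn * 2 ^ j ≤ mx ↔ j < K) :
    ∀ (fuel i : Nat), K - i ≤ fuel →
      pvLoopA fuel (mn * 2 ^ i) mx = (List.range (K - i)).map (fun j => mn * 2 ^ (i + j)) := by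
  intro fuel
  induction fuel with
  | zero =>
    intro i hf
    have h0 : K - i = 0 := by omega
    rw [h0]
    rfl
  | succ n ih =>
    intro i hf
    simp only [pvLoopA]
    split_ifs with h
    · have hi : i < K := (hK i).mp h
      have h1 : K - i = (K - (i + 1)) + 1 := by omega
      rw [h1, List.range_succ_eq_map, List.map_cons, List.map_map]
      have h2 : mn * 2 ^ i * 2 = mn * 2 ^ (i + 1) := by rw [pow_succ]; ring
      rw [h2, ih (i + 1) (by omega)]
      apply congrArg₂ List.cons
      · rw [Nat.add_zero]
      · apply List.map_congr_left
        intro a _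
        show mn * 2 ^ (i + 1 + a) = mn * 2 ^ (i + (a + 1))
        rw [show i + 1 + a = i + (a + 1) by omega]
    · have hi : ¬ i < K := fun hlt => h ((hK i).mpr hlt)
      have h0 : K - i = 0 := by omega
      rw [h0]
      rfl

-- ===== VERDICT (by name: the statement is the Claim_ definition above) =====
theorem generate_window_lengths_py_spec : Claim_equal_generate_window_lengths_py := by
  intro mn mx _ hpre
  obtain ⟨h1, hle⟩ := hpre
  unfold Spec_generate_window_lengths_py generate_window_lengths_py generate_window_lengths_py_alt
  set K := PySem.Int.bitLength (PySem.Int.floordiv mx mn) with hKdef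
  have hK : ∀ j : Nat, mn * 2 ^ j ≤ mx ↔ j < K := fun j => pvCount_iff mn mx h1 hle j
  have hK1 : 1 ≤ K := by
    have := (hK 0).mp (by simpa using hle)
    omega
  -- fuel bound: K - 1 ≤ (mx + 1 - mn*2).toNat
  have hfuel : K - 1 ≤ (mx + 1 - mn * 2).toNat := by
    by_cases h2 : 2 ≤ K
    · have hterm : mn * 2 ^ (K - 1) ≤ mx := (hK (K - 1)).mpr (by omega)
      have hpow : (2:Int) ^ 1 ≤ (2:Int) ^ (K - 1) :=
        pow_le_pow_right₀ (by norm_num) (by omega)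
      have hpow2 : ((K - 1 : Nat) : Int) < (2:Int) ^ (K - 1) := by
        have := Nat.lt_two_pow_self (n := K - 1)
        exact_mod_cast this
      have hfac : 0 ≤ (mn - 1) * ((2:Int) ^ (K - 1) - 2) := by
        apply mul_nonneg <;> omega
      have : ((K - 1 : Nat) : Int) ≤ mx + 1 - mn * 2 := by nlinarith
      omega
    · omega
  have hloop := pvLoopA_map mn mx K hK ((mx + 1 - mn * 2).toNat) 1 hfuel
  have haux : mn * 2 ^ 1 = mn * 2 := by ring
  rw [haux] at hloop
  rw [hloop]
  have hKs : K = (K - 1) + 1 := by omega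
  rw [hKs, List.range_succ_eq_map, List.map_cons, List.map_map]
  apply congrArg₂ List.cons
  · rw [pow_zero, mul_one]
  · rw [show K - 1 + 1 - 1 = K - 1 from rfl]
    apply List.map_congr_left
    intro a _
    show mn * 2 ^ (1 + a) = mn * 2 ^ (a + 1)
    rw [show 1 + a = a + 1 by omega]
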